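-- pv_equiv track=rewrite | github.com/hypergraphman/Gruppa1EGE24 | task23/17.py | f
-- ===== SOURCE A (Python) =====
-- def f(st, fn):
--     if st > fn or st == 11:
--         return 0
--     if st == fn:
--         return 1
--     m = [f(st + 1, fn),
--          f(st + 3, fn),
--          f(st * 3, fn)]
--     return sum(m)
-- ===== SOURCE B (Python) =====
-- def f(st, fn):
--     if st > fn or st == 11:
--         return 0
--     if st == fn:
--         return 1
--     counts = {st: 1}
--     for x in range(st, fn):
--         if x == 11:
--             continue
--         c = counts.get(x, 0)
--         for y in (x + 1, x + 3, 3 * x):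
--             if y <= fn:
--                 counts[y] = counts.get(y, 0) + c
--     return 0 if fn == 11 else counts.get(fn, 0)
-- ===== Notes on version B (the rewrite author's own statement) =====
-- stated objective: alternative
-- what changed: Replaces A's exponential three-way recursion by a single forward dynamic-programming pass that propagates path counts through a dict over the states st..fn.
import Mathlib
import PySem

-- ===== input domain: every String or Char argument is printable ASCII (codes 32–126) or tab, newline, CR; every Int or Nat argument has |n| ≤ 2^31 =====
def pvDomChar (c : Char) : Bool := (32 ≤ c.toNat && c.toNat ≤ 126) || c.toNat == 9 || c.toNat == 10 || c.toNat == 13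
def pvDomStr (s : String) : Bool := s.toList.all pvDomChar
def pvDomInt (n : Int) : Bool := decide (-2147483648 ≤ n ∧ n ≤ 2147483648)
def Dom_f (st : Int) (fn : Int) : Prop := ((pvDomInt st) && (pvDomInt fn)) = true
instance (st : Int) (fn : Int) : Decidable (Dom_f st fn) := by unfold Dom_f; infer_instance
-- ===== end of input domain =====

-- B replaces A's three-way recursion by a single forward dynamic-programming pass over
-- a dict of path counts (objective: alternative).

-- ===== PORT A =====
-- fuel makes the recursion total; on Pre_f the fuel ((fn-st).toNat+1) is never exhausted,
-- so fA transcribes A's recursion step for step there.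
def fA : Nat → Int → Int → Int
  | 0, _, _ => 0
  | k+1, st, fn =>
    if st > fn ∨ st = 11 then 0
    else if st = fn then 1
    else
      let m := [fA k (st + 1) fn, fA k (st + 3) fn, fA k (st * 3) fn]
      m.sum

def f (st : Int) (fn : Int) : Int := fA ((fn - st).toNat + 1) st fn

-- ===== PORT B =====
-- one loop iteration of Source B: skip 11, else propagate counts[x] to x+1, x+3, 3*x
def stepB (fn : Int) (d : PySem.Dict Int Int) (x : Int) : PySem.Dict Int Int :=
  if x = 11 then d
  else
    let c := d.getD x 0
    [x + 1, x + 3, 3 * x].foldl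
      (fun d y => if y ≤ fn then d.insert y (d.getD y 0 + c) else d) d

def f_alt (st : Int) (fn : Int) : Int :=
  if st > fn ∨ st = 11 then 0
  else if st = fn then 1
  else
    let d := (PySem.List.pyRange st fn 1).foldl (stepB fn) (PySem.Dict.empty.insert st 1)
    if fn = 11 then 0 else d.getD fn 0

-- ===== PRECONDITION & SPEC =====
-- Pre_f excludes exactly the inputs with st ≤ 0 and st < fn, on which A recurses forever
-- through st*3 (Python raises RecursionError); A returns normally everywhere else.
def Pre_f (st : Int) (fn : Int) : Prop := 1 ≤ st ∨ fn ≤ st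
instance (st : Int) (fn : Int) : Decidable (Pre_f st fn) := by unfold Pre_f; infer_instance
def pvWitness_f : Int × Int := (1, 10)

def Spec_f (st : Int) (fn : Int) (out : Int) : Prop := out = f_alt st fn
instance (st : Int) (fn : Int) (out : Int) : Decidable (Spec_f st fn out) := by unfold Spec_f; infer_instance

-- ===== CLAIM (what is proved, stated in full; the proofs are below) =====
def Claim_equal_f : Prop := ∀ (st : Int) (fn : Int), Dom_f st fn → Pre_f st fn → Spec_f st fn (f st fn)

-- ===== LEMMAS AND PROOFS =====

-- fuel irrelevance: with st ≥ 1 any sufficient fuel gives the same value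
lemma fA_mono (n : Nat) : ∀ (st fn : Int) (k₁ k₂ : Nat), (fn - st).toNat ≤ n → 1 ≤ st →
    (fn - st).toNat < k₁ → (fn - st).toNat < k₂ → fA k₁ st fn = fA k₂ st fn := by
  induction n with
  | zero =>
    intro st fn k₁ k₂ hn h1 hk₁ hk₂
    obtain ⟨a, rfl⟩ : ∃ a, k₁ = a + 1 := ⟨k₁ - 1, by omega⟩
    obtain ⟨b, rfl⟩ : ∃ b, k₂ = b + 1 := ⟨k₂ - 1, by omega⟩
    have hfn : fn ≤ st := by omega
    simp only [fA]
    rcases lt_or_eq_of_le hfn with h | h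
    · simp [h]
    · simp [h.symm]
  | succ n ih =>
    intro st fn k₁ k₂ hn h1 hk₁ hk₂
    obtain ⟨a, rfl⟩ : ∃ a, k₁ = a + 1 := ⟨k₁ - 1, by omega⟩
    obtain ⟨b, rfl⟩ : ∃ b, k₂ = b + 1 := ⟨k₂ - 1, by omega⟩
    simp only [fA]
    by_cases hgt : st > fn ∨ st = 11
    · simp [hgt]
    · by_cases heq : st = fn
      · simp [heq, hgt]
      · have hlt : st < fn := by
          rcases lt_trichotomy st fn with h | h | h
          · exact h
          · exact absurd h heq
          · exact absurd (Or.inl h) hgt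
        simp only [if_neg hgt, if_neg heq]
        have e1 : fA a (st + 1) fn = fA b (st + 1) fn :=
          ih (st + 1) fn a b (by omega) (by omega) (by omega) (by omega)
        have e2 : fA a (st + 3) fn = fA b (st + 3) fn :=
          ih (st + 3) fn a b (by omega) (by omega) (by omega) (by omega)
        have e3 : fA a (st * 3) fn = fA b (st * 3) fn :=
          ih (st * 3) fn a b (by omega) (by omega) (by omega) (by omega)
        simp [e1, e2, e3]

lemma f_of_base (st fn : Int) (h : st > fn ∨ st = 11) : f st fn = 0 := by
  simp [f, fA, h]

lemma f_of_eq (st fn : Int) (hgt : ¬ (st > fn ∨ st = 11)) (h : st = fn) : f st fn = 1 := by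
  have h11 : st ≠ 11 := fun e => hgt (Or.inr e)
  subst h
  simp [f, fA, h11]

lemma f_rec (st fn : Int) (h1 : 1 ≤ st) (h2 : st < fn) (h3 : st ≠ 11) :
    f st fn = f (st + 1) fn + f (st + 3) fn + f (st * 3) fn := by
  have hN : 1 ≤ (fn - st).toNat := by omega
  have hgt : ¬ (st > fn ∨ st = 11) := by
    push_neg; exact ⟨by omega, h3⟩
  have heq : st ≠ fn := by omega
  have e1 : fA (fn - st).toNat (st + 1) fn = f (st + 1) fn :=
    fA_mono ((fn - (st + 1)).toNat) (st + 1) fn _ _ (le_refl _) (by omega) (by omega) (by omega)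
  have e2 : fA (fn - st).toNat (st + 3) fn = f (st + 3) fn :=
    fA_mono ((fn - (st + 3)).toNat) (st + 3) fn _ _ (le_refl _) (by omega) (by omega) (by omega)
  have e3 : fA (fn - st).toNat (st * 3) fn = f (st * 3) fn :=
    fA_mono ((fn - st * 3).toNat) (st * 3) fn _ _ (le_refl _) (by omega) (by omega) (by omega)
  rw [show f st fn = fA ((fn - st).toNat + 1) st fn from rfl, fA]
  rw [if_neg hgt, if_neg heq]
  simp only [List.sum_cons, List.sum_nil, add_zero]
  rw [e1, e2, e3]
  ring

-- the weighted sum Σ_{y=x}^{fn} d[y] * f(y, fn): the loop invariant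
def S (fn : Int) (d : PySem.Dict Int Int) (x : Int) : Int :=
  ((PySem.List.pyRange x (fn + 1) 1).map (fun y => d.getD y 0 * f y fn)).sum

lemma sum_map_insert_add (fn : Int) (l : List Int) (d : PySem.Dict Int Int) (y c : Int)
    (hl : l.Nodup) :
    ((l.map (fun z => (d.insert y (d.getD y 0 + c)).getD z 0 * f z fn)).sum)
      = (l.map (fun z => d.getD z 0 * f z fn)).sum + (if y ∈ l then c * f y fn else 0) := by
  induction l with
  | nil => simp
  | cons a l ih =>
    rw [List.nodup_cons] at hl
    obtain ⟨ha, hl⟩ := hl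
    rw [List.map_cons, List.sum_cons, List.map_cons, List.sum_cons, ih hl,
      PySem.Dict.getD_insert]
    by_cases hay : a = y
    · subst hay
      rw [if_pos rfl, if_neg ha, if_pos (List.mem_cons_self)]
      ring
    · have hiff : (y = a ∨ y ∈ l) ↔ y ∈ l :=
        ⟨fun h => h.elim (fun e => absurd e.symm hay) id, Or.inr⟩
      rw [if_neg hay, if_congr ((List.mem_cons).trans hiff) rfl rfl]
      ring

lemma sum_single (fn : Int) (l : List Int) (a : Int) (g : Int → Int) (hl : l.Nodup)
    (ha : a ∈ l) :
    (l.map (fun y => (if y = a then (1:Int) else 0) * g y)).sum = g a := by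
  induction l with
  | nil => simp at ha
  | cons b l ih =>
    rw [List.nodup_cons] at hl
    obtain ⟨hb, hl⟩ := hl
    rcases List.mem_cons.mp ha with h | h
    · have hterm : (if b = a then (1:Int) else 0) * g b = g a := by
        rw [if_pos h.symm, ← h]
        ring
      have hrest : (l.map (fun y => (if y = a then (1:Int) else 0) * g y)).sum = 0 := by
        apply List.sum_eq_zero
        intro z hz
        simp only [List.mem_map] at hz
        obtain ⟨w, hw, rfl⟩ := hz
        have hwa : w ≠ a := by
          intro e
          rw [e, h] at hw
          exact hb hw
        rw [if_neg hwa]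
        ring
      simp only [List.map_cons, List.sum_cons, hterm, hrest, add_zero]
    · have hba : ¬ b = a := fun e => hb (e ▸ h)
      simp only [List.map_cons, List.sum_cons, if_neg hba, ih hl h]
      ring

lemma step_invariant (fn x : Int) (d : PySem.Dict Int Int) (h1 : 1 ≤ x) (h2 : x < fn) :
    S fn (stepB fn d x) (x + 1) = S fn d x := by
  have hcons : PySem.List.pyRange x (fn + 1) 1 = x :: PySem.List.pyRange (x + 1) (fn + 1) 1 :=
    PySem.List.pyRange_one_cons (by omega)
  have hnodup : (PySem.List.pyRange (x + 1) (fn + 1) 1).Nodup := PySem.List.nodup_pyRange_one _ _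
  have hmem : ∀ y : Int, y ∈ PySem.List.pyRange (x + 1) (fn + 1) 1 ↔ x + 1 ≤ y ∧ y < fn + 1 :=
    fun y => PySem.List.mem_pyRange_one
  by_cases h11 : x = 11
  · have hf : f x fn = 0 := f_of_base x fn (Or.inr h11)
    simp only [stepB, if_pos h11, S, hcons, List.map_cons, List.sum_cons, hf]
    ring
  · simp only [stepB, if_neg h11, List.foldl]
    set c := d.getD x 0 with hc
    -- three successive conditional inserts
    set d1 := if x + 1 ≤ fn then d.insert (x + 1) (d.getD (x + 1) 0 + c) else d with hd1
    set d2 := if x + 3 ≤ fn then d1.insert (x + 3) (d1.getD (x + 3) 0 + c) else d1 with hd2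
    set d3 := if 3 * x ≤ fn then d2.insert (3 * x) (d2.getD (3 * x) 0 + c) else d2 with hd3
    have key : ∀ (e : PySem.Dict Int Int) (y : Int),
        S fn (if y ≤ fn then e.insert y (e.getD y 0 + c) else e) (x + 1)
          = S fn e (x + 1) + (if x + 1 ≤ y ∧ y ≤ fn then c * f y fn else 0) := by
      intro e y
      by_cases hy : y ≤ fn
      · simp only [if_pos hy, S]
        rw [sum_map_insert_add fn _ e y c hnodup]
        congr 1
        by_cases hy2 : x + 1 ≤ y
        · rw [if_pos ((hmem y).mpr ⟨hy2, by omega⟩), if_pos ⟨hy2, hy⟩]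
        · rw [if_neg (fun h => hy2 ((hmem y).mp h).1), if_neg (fun h => hy2 h.1)]
      · simp only [if_neg hy]
        rw [if_neg (fun h => hy h.2)]
        ring
    have e3 : S fn d3 (x + 1) = S fn d2 (x + 1) + (if x + 1 ≤ 3 * x ∧ 3 * x ≤ fn then c * f (3 * x) fn else 0) := key d2 (3 * x)
    have e2 : S fn d2 (x + 1) = S fn d1 (x + 1) + (if x + 1 ≤ x + 3 ∧ x + 3 ≤ fn then c * f (x + 3) fn else 0) := key d1 (x + 3)
    have e1 : S fn d1 (x + 1) = S fn d (x + 1) + (if x + 1 ≤ x + 1 ∧ x + 1 ≤ fn then c * f (x + 1) fn else 0) := key d (x + 1)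
    have hx1 : (x + 1 ≤ x + 1 ∧ x + 1 ≤ fn) := ⟨le_refl _, by omega⟩
    have hrec : f x fn = f (x + 1) fn + f (x + 3) fn + f (3 * x) fn := by
      rw [f_rec x fn h1 h2 h11, show x * 3 = 3 * x from mul_comm x 3]
    have hz3 : (if x + 1 ≤ 3 * x ∧ 3 * x ≤ fn then c * f (3 * x) fn else 0) = c * f (3 * x) fn := by
      by_cases h : 3 * x ≤ fn
      · rw [if_pos ⟨by omega, h⟩]
      · rw [if_neg (fun hh => h hh.2), f_of_base (3 * x) fn (Or.inl (by omega))]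
        ring
    have hz2 : (if x + 1 ≤ x + 3 ∧ x + 3 ≤ fn then c * f (x + 3) fn else 0) = c * f (x + 3) fn := by
      by_cases h : x + 3 ≤ fn
      · rw [if_pos ⟨by omega, h⟩]
      · rw [if_neg (fun hh => h hh.2), f_of_base (x + 3) fn (Or.inl (by omega))]
        ring
    rw [e3, e2, e1, if_pos hx1, hz2, hz3]
    have hS : S fn d x = c * f x fn + S fn d (x + 1) := by
      simp only [S, hcons, List.map_cons, List.sum_cons, hc]
    rw [hS, hrec]
    ring

lemma loop_invariant (fn : Int) (n : Nat) : ∀ (x : Int) (d : PySem.Dict Int Int),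
    (fn - x).toNat = n → 1 ≤ x → x ≤ fn →
    S fn ((PySem.List.pyRange x fn 1).foldl (stepB fn) d) fn = S fn d x := by
  induction n with
  | zero =>
    intro x d hn h1 h2
    have hx : x = fn := by omega
    subst hx
    rw [PySem.List.pyRange_one_eq_nil (le_refl _)]
    simp
  | succ n ih =>
    intro x d hn h1 h2
    have hlt : x < fn := by omega
    rw [PySem.List.pyRange_one_cons hlt, List.foldl_cons]
    rw [ih (x + 1) (stepB fn d x) (by omega) (by omega) (by omega)]
    exact step_invariant fn x d h1 hlt

-- ===== VERDICT (by name: the statement is the Claim_ definition above) =====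
theorem f_spec : Claim_equal_f := by
  unfold Claim_equal_f
  intro st fn _ hpre
  unfold Spec_f f_alt
  by_cases hbase : st > fn ∨ st = 11
  · rw [if_pos hbase, f_of_base st fn hbase]
  · by_cases heq : st = fn
    · rw [if_neg hbase, if_pos heq, f_of_eq st fn hbase heq]
    · have hlt : st < fn := by
        rcases lt_trichotomy st fn with h | h | h
        · exact h
        · exact absurd h heq
        · exact absurd (Or.inl h) hbase
      have h1 : 1 ≤ st := by
        rcases hpre with h | h
        · exact h
        · omega
      rw [if_neg hbase, if_neg heq]
      have hfinal := loop_invariant fn ((fn - st).toNat) st (PySem.Dict.empty.insert st 1)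
        rfl h1 (by omega)
      -- left side: S at fn of the final dict is getD fn * f fn fn
      have hsing : PySem.List.pyRange fn (fn + 1) 1 = [fn] := PySem.List.pyRange_one_singleton fn
      have hS0 : S fn (PySem.Dict.empty.insert st 1) st = f st fn := by
        unfold S
        have hmap : (PySem.List.pyRange st (fn + 1) 1).map
            (fun y => (PySem.Dict.empty.insert st 1).getD y 0 * f y fn)
            = (PySem.List.pyRange st (fn + 1) 1).map
              (fun y => (if y = st then (1:Int) else 0) * f y fn) := by
          apply List.map_congr_left
          intro y _
          rw [PySem.Dict.getD_insert]
          by_cases h : y = st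
          · rw [if_pos h, if_pos h]
          · rw [if_neg h, if_neg h, PySem.Dict.getD_empty]
        rw [hmap, sum_single fn _ st (fun y => f y fn) (PySem.List.nodup_pyRange_one _ _)
          (PySem.List.mem_pyRange_one.mpr ⟨le_refl _, by omega⟩)]
      set dfin := (PySem.List.pyRange st fn 1).foldl (stepB fn) (PySem.Dict.empty.insert st 1) with hdfin
      have hSfn : S fn dfin fn = dfin.getD fn 0 * f fn fn := by
        unfold S
        rw [hsing]
        simp
      by_cases h11 : fn = 11
      · rw [if_pos h11]
        have : f fn fn = 0 := f_of_base fn fn (Or.inr h11)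
        rw [hS0, hSfn, this] at hfinal
        rw [← hfinal]
        ring
      · rw [if_neg h11]
        have : f fn fn = 1 := f_of_eq fn fn (by push_neg; exact ⟨by omega, h11⟩) rfl
        rw [hS0, hSfn, this] at hfinal
        rw [← hfinal]
        ring
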